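/-
  THE MDCT VOCABULARY AT WORK (Vorbis/Mdct.lean): one example of each thing a worker of inverse_mdct, of the step-3 helpers,
  of the setup functions or of a caller does with it.
      (a) a check site of a straight loop: upward pointer, downward pointer, the table-indexed access of steps 4-5-6 (M4);
          the check site of each group in three lines (`have s := h.site_… hL … ha`, `exact s.acc hc`)
      (b) a loop test: the `!=` loop L1, an unsigned pointer comparison with its exit value below the array
      (c) step 3: a call site (arguments, iteration count, precondition of the helper), a check site inside a helper
      (d) the invariant carried over a store to `buf2`, over a store to another field of `*f`, over `previous_length = …`;
          `transfer` of each group from `ObjSame`, from `DecodeSame`, from a `Copied` / a `Move`; `reblk`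
      (e) establishment: the two groups assembled (SD.10, SD.11), the channel loop, one iteration of compute_bitreverse; the
          numbers of one block size by case split
-/
import Vorbis.Mdct
namespace Vorbis.MdctTest
open X86 X86.User Asan Vorbis Vorbis.Mdct

/-! ### (a) Check sites of the straight loops -/

/-- L1, `call __asan_load4_noabort(e + 8)` = `e[2]` with `r13 = e = addr (u + 16 * t)`: the buffer is an allocated block of
`4 * b1` bytes (M6) and the frame has `n ≤ b1` floats. The register value, as the check routine's contract wants it: the site,
then `.acc_addr hc`. -/
example (Live : Nat → Prop) (Blk : Block → Prop) (mem : Mem) (u n b1 t : Nat) (hc : Covers Live mem) (hL : BlkLive Blk Live)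
    (hu : Blk ⟨u, 4 * b1⟩) (hn : IsBlocksize n) (hnb : n ≤ b1) (ht : t < n / 8) :
    AccessibleSmall mem (addr (u + 16 * t) + 8 : Word).toNat 4 := by
  simp only [vfield]
  have s : Site Live (u + 16 * t + 8) 4 := site_f32 hL hu (L1.e hn ht (Nat.le_refl 2)) (by omega) (by omega)
  exact s.acc_addr hc

/-- L1, the store check of `d[1]` with `r12 = d = addr (v + 4 * (n / 2 - 2 - 2 * t))`: a pointer that walks DOWN; `buf2` is a
block of exactly `2 n` bytes, a temp block the worker knows to be LIVE from the shadow layer (`site_f32_live`). The lemma's first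
component says the subtraction is not truncated. -/
example (Live : Nat → Prop) (mem : Mem) (v n t : Nat) (hc : Covers Live mem) (hv : (Block.mk v (2 * n)).live Live)
    (hn : IsBlocksize n) (ht : t < n / 8) :
    AccessibleSmall mem (v + 4 * (n / 2 - 2 - 2 * t) + 4) 4 := by
  have h := L1.d hn ht (Nat.le_refl 1)
  have s : Site Live (v + 4 * (n / 2 - 2 - 2 * t) + 4) 4 := site_f32_live hv h.2.2 (by omega) (by omega)
  exact s.acc hc

/-- L2, the same store with the RECOMMENDED invariant for a downward pointer, a sum about its value: `p + 8 t + 8 = v + n`.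
`L2.ptr` turns it into the element address. -/
example (Live : Nat → Prop) (mem : Mem) (v n t p : Nat) (hc : Covers Live mem) (hv : (Block.mk v (2 * n)).live Live)
    (hn : IsBlocksize n) (ht : t < n / 8) (hp : p + 8 * t + 8 = v + n) : AccessibleSmall mem (p + 4) 4 := by
  have h1 := L2.ptr hn ht hp
  have h2 := L2.d hn ht (Nat.le_refl 1)
  have s : Site Live (p + 4) 4 := site_f32_live hv h2.2 (by have := hn.facts; omega) (by omega)
  exact s.acc hc

/-- A pointer expression in ANOTHER shape than the lemma's (bytes instead of elements): `hn.facts`, then `omega`. -/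
example (n t : Nat) (hn : IsBlocksize n) (ht : t < n / 16) : 2 * n - 32 - 32 * t + 20 + 4 ≤ 2 * n := by
  have := hn.facts
  omega

/-- Steps 4-5-6, `call __asan_load4_noabort(u + 4 * k4 + 8)` with `k4` the zero-extended `uint16` just loaded from
`R + 2 * (2 * t + 1)`: M4 (`RevOK`) bounds it, whatever the table holds otherwise. `u` is the channel buffer (an allocated
block: `hL _ hu` is its liveness) or the temp block (live from the shadow layer). -/
example (Live : Nat → Prop) (Blk : Block → Prop) (mem : Mem) (u R n b1 t : Nat) (hc : Covers Live mem) (hL : BlkLive Blk Live)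
    (hu : Blk ⟨u, 4 * b1⟩) (hn : IsBlocksize n) (hnb : n ≤ b1) (hR : RevOK mem R n) (ht : t < n / 16) :
    AccessibleSmall mem (u + mem.u16 (R + 2 * (2 * t + 1)) * 4 + 8) 4 := by
  have s : Site Live (u + mem.u16 (R + 2 * (2 * t + 1)) * 4 + 8) 4 :=
    hR.site_u (j := 1) (q := 2) hn (hL _ hu) (by omega) ht (Nat.le_refl 1) (by omega) (by omega)
  exact s.acc hc

/-- The load of that table entry itself: `__asan_load2_noabort(R + 4 * t + 2)`, the table a block of `n / 4` bytes. -/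
example (Live : Nat → Prop) (Blk : Block → Prop) (mem : Mem) (R n t : Nat) (hc : Covers Live mem) (hL : BlkLive Blk Live)
    (hR : Blk ⟨R, n / 4⟩) (hn : IsBlocksize n) (ht : t < n / 16) : AccessibleSmall mem (R + 4 * t + 2) 2 := by
  have s : Site Live (R + 4 * t + 2) 2 := site_u16 hL hR (S456.rev hn ht (Nat.le_refl 1)) (by omega) (by omega)
  exact s.acc hc

/-- From the invariant to the numbers `inverse_mdct` works with: `n = blocksize[bt]` is a legal size, the twiddle table `A` is
the allocated block of `2 n` bytes, the bit-reverse table satisfies M4, the channel buffer has room for the frame. -/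
example (Blk : Block → Prop) (mem : Mem) (f bt c : Nat) (h : MdctOK Blk mem f) (hb : BuffersOK Blk mem f) (hd : HD3 mem f)
    (hbt : bt < 2) (hch : (c : Int) < stb_vorbis.channels mem f) :
    IsBlocksize (bsize mem f bt) ∧
    Blk ⟨stb_vorbis.A mem f bt, 2 * bsize mem f bt⟩ ∧
    RevOK mem (stb_vorbis.bit_reverse mem f bt) (bsize mem f bt) ∧
    Blk ⟨stb_vorbis.channel_buffers mem f c, 4 * bsize mem f 1⟩ ∧ bsize mem f bt ≤ bsize mem f 1 :=
  ⟨hd.size bt, (h.M3 bt hbt).A, h.M4 bt hbt, (hb.M6 c hch).1, hd.le_b1 bt⟩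

/-- THE CHECK SITE OF `MdctOK` IN THREE LINES: inverse_mdct, `__asan_load4(&A[bt][i])` with the address in the shape the
stepper leaves (`mem.u64 (f + 1400 + 8 * bt) + 4 * i`); `ha` is closed by `simp only [vacc, voff]`. -/
example (Live : Nat → Prop) (Blk : Block → Prop) (mem : Mem) (f bt i : Nat) (h : MdctOK Blk mem f) (hc : Covers Live mem)
    (hL : BlkLive Blk Live) (hbt : bt < 2) (hi : i < bsize mem f bt / 2) :
    AccessibleSmall mem (mem.u64 (f + 1400 + 8 * bt) + 4 * i) 4 := by
  have s : Site Live (mem.u64 (f + 1400 + 8 * bt) + 4 * i) 4 :=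
    (h.M3 bt hbt).site_A hL hi (by simp only [vacc, voff])
  exact s.acc hc

/-- The load of a bit-reverse entry from M3, 2 bytes, and the side condition `L.Has` of the load that follows the check. -/
example (L : Layout) (Live : Nat → Prop) (Blk : Block → Prop) (mem : Mem) (f bt i : Nat) (h : MdctOK Blk mem f)
    (hc : Covers Live mem) (hL : BlkLive Blk Live) (hLay : 0xC00000 ≤ L.hi) (hbt : bt < 2) (hi : i < bsize mem f bt / 8) :
    AccessibleSmall mem (stb_vorbis.bit_reverse_at mem f bt i) 2 ∧ L.Has (addr (stb_vorbis.bit_reverse_at mem f bt i)) 2 := by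
  have s := (h.M3 bt hbt).site_bit_reverse hL hi rfl
  exact ⟨s.acc hc, s.has hc hLay⟩

/-- THE CHECK SITE OF `BuffersOK` IN THREE LINES: vorbis_finish_frame, `channel_buffers[i][left + j]` in the stepper's shape,
from M6. -/
example (Live : Nat → Prop) (Blk : Block → Prop) (mem : Mem) (f i left j : Nat) (h : BuffersOK Blk mem f) (hc : Covers Live mem)
    (hL : BlkLive Blk Live) (hi : (i : Int) < stb_vorbis.channels mem f) (hlj : left + j < bsize mem f 1) :
    AccessibleSmall mem (mem.u64 (f + 872 + 8 * i) + 4 * (left + j)) 4 := by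
  have s : Site Live (mem.u64 (f + 872 + 8 * i) + 4 * (left + j)) 4 :=
    h.M6.site_channel_buffer hL hi hlj (by simp only [vacc, voff])
  exact s.acc hc

/-- `previous_window[i][j]`, `j < b1 / 2`, in the accessor's shape (`ha` by `rfl`). -/
example (Live : Nat → Prop) (Blk : Block → Prop) (mem : Mem) (f i j : Nat) (h : BuffersOK Blk mem f) (hc : Covers Live mem)
    (hL : BlkLive Blk Live) (hi : (i : Int) < stb_vorbis.channels mem f) (hj : j < bsize mem f 1 / 2) :
    AccessibleSmall mem (stb_vorbis.previous_window_at mem f i j) 4 := by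
  have s := h.M6.site_previous_window hL hi hj rfl
  exact s.acc hc

/-- The tables lie in the data space: the no-wrap bounds `RevOK.of_writeLE` asks for come from `BlkOK`. -/
example (Blk : Block → Prop) (mem : Mem) (f bt : Nat) (h : MdctOK Blk mem f) (hok : BlkOK Blk) (hbt : bt < 2) :
    stb_vorbis.bit_reverse mem f bt + bsize mem f bt / 4 ≤ 2 ^ 64 := by
  have := (h.M3 bt hbt).inside hok
  omega

/-! ### (b) Loop tests -/

/-- L1's `cmp r13, r15 ; jne`: with the invariant `t ≤ n / 8` the words differ exactly while `t < n / 8`. -/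
example (u n t : Nat) (hn : IsBlocksize n) (ht : t ≤ n / 8) (hu : u + 2 * n < 2 ^ 64) :
    addr (u + 16 * t) ≠ addr (u + 2 * n) ↔ t < n / 8 := by
  have h := L1.test_addr hn ht u hu
  constructor
  · intro hne
    have : t ≠ n / 8 := fun e => hne (h.mpr e)
    omega
  · intro hlt e
    have := h.mp e
    omega

/-- L2's `cmp r12, r15 ; jae` (unsigned `d >= buf2`): the register holds a NUMBER `p` with `p + 8 t + 8 = v + n` for every
`t ≤ n / 8`, also at the exit where `p = v - 8`; the comparison of the two numbers decides `t < n / 8`. No wrap: `p` and `v` are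
the `toNat` of the registers. -/
example (r12 r15 : Word) (v n t : Nat) (hn : IsBlocksize n) (ht : t ≤ n / 8) (h15 : r15.toNat = v)
    (h12 : r12.toNat + 8 * t + 8 = v + n) : r15.toNat ≤ r12.toNat ↔ t < n / 8 := by
  rw [h15]
  exact L2.test hn ht h12

/-- The decrement that produces the exit value does not wrap: after the last iteration `d = buf2 - 8` as a word, because
`buf2 ≥ 8` (it is an arena address). -/
example (v n : Nat) (hn : IsBlocksize n) (hv : 0x800000 ≤ v) (hv2 : v < 0xC00000) :
    (addr v - 8 : Word).toNat + 8 * (n / 8) + 8 = v + n := by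
  have e : (addr v - 8 : Word) = addr (v - 8) := addr_sub_lit v 8 (by omega)
  rw [e, toNat_addr _ (by omega)]
  exact L2.exit_value hn (by omega)

/-! ### (c) Step 3 -/

/-- A call site of the first `l` loop: the iteration count of the callee, the argument `d0` as a number, and the callee's
precondition on `u` as `InLive` of the two runs, from the live block of the channel buffer. -/
example (Live : Nat → Prop) (u n k b1 l i : Nat) (h : Ld n k) (hl : InFirst k l) (hi : i < lim l)
    (hu : (Block.mk u (4 * b1)).live Live) (hnb : n ≤ b1) :
    (n >>> (l + 4)) >>> 2 = rlim n l ∧ k0 n l * i ≤ n / 2 - 1 ∧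
    InLive Live (u + 4 * (n / 2 - 1 - k0 n l * i + 1 - 8 * rlim n l)) (4 * (8 * rlim n l)) ∧
    InLive Live (u + 4 * (n / 2 - 1 - k0 n l * i + 1 - k02 n l - 8 * rlim n l)) (4 * (8 * rlim n l)) := by
  have hf := Call.firstL h hl
  have hcall := Call.firstL_call h hl hi
  have hk0 : 1 ≤ k0 n l := by
    have := hf.half
    have := hf.cnt
    have := hf.m_ge
    omega
  refine ⟨hf.m_eq, by omega, hcall.2.inLive0 hu (by omega), hcall.2.inLive2 hu (by omega)⟩

/-- The twiddle factors of that call: the highest index `k1 (4 m - 1) + 1` the callee reads is inside `A[0 .. n2)`. -/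
example (n k l t j d : Nat) (h : Ld n k) (hl : InFirst k l) (ht : t < rlim n l) (hj : j ≤ 3) (hd : d ≤ 1) :
    k1 l * (4 * t + j) + d < n / 2 := by
  have h1 := RLoop.A (k1 := k1 l) ht hj hd
  have h2 := (Call.firstL h hl).A
  omega

/-- For the three smallest block sizes neither `l` loop runs; for `n = 64` the four r_loop calls do nothing. -/
example (n k : Nat) (h : Ld n k) (h8 : k ≤ 8) : ¬ InFirst k 2 ∧ ¬ InSecond k (lmid k) ∧ (n = 64 → (n >>> 5) >>> 2 = 0) := by
  have h1 := no_l_loops h.ge h8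
  have h2 := (Call.r1 h.isBlocksize (Nat.zero_le 3)).m_eq
  have h3 := Call.r1_count h.isBlocksize
  rw [h1.2.1]
  exact ⟨h1.1, h1.2.2, by omega⟩

/-- INSIDE imdct_step3_iter0_loop: the check of `ee2[-5]` in iteration `t` (`rbx = ee2 - 32 t`, site `rbx - 20`), from the
precondition "the `8 m` floats `ee2[-8m + 1 .. 0]` are live". -/
example (Live : Nat → Prop) (mem : Mem) (ee2 m t : Nat) (hc : Covers Live mem)
    (hpre : InLive Live (ee2 + 4 - 4 * (8 * m)) (4 * (8 * m))) (hm : 4 * (8 * m) ≤ ee2 + 4) (ht : t < m) :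
    AccessibleSmall mem (ee2 - 32 * t - 20) 4 := by
  have s : Site Live (ee2 - 32 * t - 20) 4 := site_f32_down hpre hm (Iter0.e ht (by omega : 5 ≤ 7)) (by omega)
  exact s.acc hc

/-- INSIDE imdct_step3_inner_s_loop_ld654: `while (z > base)` as `cmp r15, rbx ; jb`. -/
example (rbx r15 : Word) (z0 m t : Nat) (ht : t ≤ m) (hz : rbx.toNat + 64 * t = z0) (hb : r15.toNat + 64 * m = z0) :
    r15.toNat < rbx.toNat ↔ t < m :=
  Ld654.test ht hz hb

/-- The ld654 call: its 16 `n'` floats are exactly `u[0 .. n2)`, its `base` is `u - 4` bytes. -/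
example (u n : Nat) (hn : IsBlocksize n) (hu : 0x800000 ≤ u) :
    16 * (n >>> 5) = n / 2 ∧ (u - 4) + 64 * (n >>> 5) = u + 4 * (n / 2 - 1) := by
  have h := Call.ld654 hn
  rw [h.m_eq]
  exact ⟨h.span, Call.ld654_base hn (by omega)⟩

/-! ### (d) Frame -/

/-- inverse_mdct stores a float into `buf2` (a temp block, disjoint from everything else by SH3): M4 of the table it will read
in steps 4-5-6 survives. -/
example (mem : Mem) (R n v idx x : Nat) (hR : RevOK mem R n) (hd : (Block.mk R (n / 4)).disjoint (Block.mk v (2 * n)))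
    (hidx : idx < n / 2) (hv : v + 2 * n ≤ 0xC00000) (hRt : R + n / 4 ≤ 0xC00000) :
    RevOK (mem.writeLE (addr (v + 4 * idx)) 4 x) R n := by
  apply hR.of_writeLE (C := Block.mk v (2 * n)) _ 4 x hd
  · simp only [vblock]
    omega
  · simp only []
    omega
  · omega

/-- inverse_mdct stores `f->temp_offset` (offset 132, one of the gaps between the windows of `*f` the invariant reads), and the
store is outside both bit-reverse tables: the whole of `MdctOK` survives, through the windows as blocks (`frame_windows`). -/
example (Blk : Block → Prop) (mem : Mem) (f x : Nat) (h : MdctOK Blk mem f) (hok : BlkOK Blk) (hob : Blk (objBlock f))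
    (hdis : ∀ b, b < 2 →
      (Block.mk (stb_vorbis.bit_reverse mem f b) (bsize mem f b / 4)).disjoint (objBlock f)) :
    MdctOK Blk (mem.writeLE (addr (f + Off.stb_vorbis.temp_offset)) 4 x) f := by
  have hin := hok.inside _ hob
  simp only [vblock, voff] at hin
  have hf : f + Off.sizeof.stb_vorbis ≤ 2 ^ 64 := by
    simp only [voff]
    omega
  have hw := windows_of_store (mem := mem) (f := f) (off := Off.stb_vorbis.temp_offset) (k := 4) (v := x) hf
    (by simp only [voff]; omega)
  apply h.frame_windows hf hw.1 _ (fun _ _ hb => hb)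
  intro B hB
  cases hB with
  | bit_reverse b hb =>
    apply Block.Kept.of_writeLE mem _ 4 x (hdis b hb)
    · simp only [vblock, voff]
      omega
    · exact hok.no_wrap hob
    · exact hok.no_wrap ((h.M3 b hb).bit_reverse)

/-- The same store through THE frame lemma: the store leaves `ObjSame` (it hits `[128, 136)`), every allocated block other than
`*f` is kept (`BlkOK.kept_store`). -/
example (Blk : Block → Prop) (mem : Mem) (f x : Nat) (h : MdctOK Blk mem f) (hok : BlkOK Blk) (hob : Blk (objBlock f))
    (hne : ∀ B, MdctOK.Reads mem f B → B ≠ objBlock f) :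
    MdctOK Blk (mem.writeLE (addr (f + Off.stb_vorbis.temp_offset)) 4 x) f := by
  have hin := hok.inside _ hob
  simp only [vblock, voff] at hin
  have e : (addr (f + Off.stb_vorbis.temp_offset)).toNat = f + Off.stb_vorbis.temp_offset := toNat_addr _ (by simp only [voff]; omega)
  have hs : ObjSame f mem (mem.writeLE (addr (f + Off.stb_vorbis.temp_offset)) 4 x) := by
    apply ObjSame.of_writeLE
    · rw [e]
      simp only [voff]
      omega
    · simp only [voff]
      omega
    · rw [e]
      simp only [voff]
      omega
  apply h.frame hs
  intro B hB
  apply hok.kept_store (h.reads_blk hB) hob (hne B hB) mem x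
  simp only [vblock, voff]
  omega

/-- TRANSFER OF `MdctOK` FROM `ObjSame` (an allocator call: `*f` changed in `[128, 136)` only, every allocated block is kept, no
block was freed: `Blk` grew to `Blk'`). -/
example (Blk Blk' : Block → Prop) (mem mem' : Mem) (f : Nat) (h : MdctOK Blk mem f) (hs : ObjSame f mem mem')
    (hk : AllKept Blk mem mem') (hB : ∀ B, Blk B → Blk' B) : MdctOK Blk' mem' f :=
  h.transfer (hs.sub (by decide)) (fun _ hR => hk _ (h.reads_blk hR)) (fun B _ hb => hB B hb)

/-- TRANSFER OF `MdctOK` FROM A `Copied` (`*f = p` in stb_vorbis_open_memory): the copy at `f` in `mem'` has the tables of the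
original at `p` in `mem`. -/
example (Blk Blk' : Block → Prop) (mem mem' : Mem) (p f : Nat) (h : MdctOK Blk mem p)
    (hcp : Copied mem p mem' f Off.sizeof.stb_vorbis) (hk : AllKept Blk mem mem') (hB : ∀ B, Blk B → Blk' B) :
    MdctOK Blk' mem' f :=
  h.transfer (ObjEq.of_copied hcp (by decide)) (fun _ hR => hk _ (h.reads_blk hR)) (fun B _ hb => hB B hb)

/-- The same from the bundled hypotheses of the move. -/
example (Blk Blk' : Block → Prop) (mem mem' : Mem) (p f : Nat) (h : MdctOK Blk mem p) (hm : Move Blk Blk' mem mem' p f) :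
    MdctOK Blk' mem' f :=
  h.transfer (hm.objEq (by decide)) (fun _ hR => hm.kept (h.reads_blk hR)) (fun B _ hb => hm.sub B hb)

/-- TRANSFER OF `BuffersOK` FROM `ObjSame` and FROM A `Copied`. `hC` is HD1. -/
example (Blk Blk' : Block → Prop) (mem mem' : Mem) (p f : Nat) (h : BuffersOK Blk mem f) (h' : BuffersOK Blk mem p)
    (hs : ObjSame f mem mem') (hcp : Copied mem p mem' f Off.sizeof.stb_vorbis) (hC : stb_vorbis.channels mem f ≤ 16)
    (hC' : stb_vorbis.channels mem p ≤ 16) (hB : ∀ B, Blk B → Blk' B) : BuffersOK Blk' mem' f ∧ BuffersOK Blk' mem' f :=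
  ⟨h.transfer (hs.sub (by decide)) hC (fun B _ hb => hB B hb),
   h'.transfer (ObjEq.of_copied hcp (by decide)) hC' (fun B _ hb => hB B hb)⟩

/-- TRANSFER OF M7 and of `Mdct.HD3` FROM `ObjSame` and FROM A `Copied`. -/
example (mem mem' : Mem) (p f : Nat) (h : M7Range mem f) (h' : M7Range mem p) (hd : HD3 mem p) (hs : ObjSame f mem mem')
    (hcp : Copied mem p mem' f Off.sizeof.stb_vorbis) : M7Range mem' f ∧ M7Range mem' f ∧ HD3 mem' f :=
  ⟨h.transfer (hs.sub (by decide)), h'.transfer (ObjEq.of_copied hcp (by decide)),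
   hd.transfer (ObjEq.of_copied hcp (by decide))⟩

/-- Decode-time code (`DecodeSame`: it never stores to the table fields; it DOES store `previous_length`): `MdctOK` by
`transfer`, `BuffersOK` by `transfer_m6` with M7 afresh. vorbis_finish_frame stores `previous_length = len - right`: M7 from W3. -/
example (Blk : Block → Prop) (mem mem' : Mem) (f : Nat) (len right : Int) (h : MdctOK Blk mem f) (hb : BuffersOK Blk mem f)
    (hd : DecodeSame f mem mem') (hk : AllKept Blk mem mem') (hC : stb_vorbis.channels mem f ≤ 16)
    (hpl : stb_vorbis.previous_length mem' f = len - right)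
    (h1 : 0 ≤ len) (h2 : right ≤ (bsize mem f 1 : Int)) (h3 : len - right ≤ ((bsize mem f 1 / 2 : Nat) : Int)) :
    MdctOK Blk mem' f ∧ BuffersOK Blk mem' f := by
  have hr : ReadsSame mem mem' f := ReadsEq.of_objEq (hd.sub (by decide))
  constructor
  · exact h.transfer (hd.sub (by decide)) (fun _ hR => hk _ (h.reads_blk hR)) (fun _ _ hx => hx)
  · apply hb.transfer_m6 (hd.sub (by decide)) hC (fun _ _ hx => hx)
    apply M7Range.of_finish hpl h1
    · rw [hr.bsize]
      exact h2
    · rw [hr.bsize]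
      exact h3

/-- Inside inverse_mdct, M4 carried store by store: `frame'` with the field equations and `RevOK` of the new memory. -/
example (Blk : Block → Prop) (mem mem' : Mem) (f : Nat) (h : MdctOK Blk mem f) (hr : ReadsSame mem mem' f)
    (hR : ∀ b, b < 2 → RevOK mem' (stb_vorbis.bit_reverse mem f b) (bsize mem f b)) : MdctOK Blk mem' f :=
  h.frame' hr hR (fun _ _ hx => hx)

/-- A temp block was freed / a frame popped: only the block predicate changes (`reblk`); the owned blocks are still allocated
because they are the group's own (`owns_blk`) and `Blk'` contains them. -/
example (Blk Blk' : Block → Prop) (mem : Mem) (f : Nat) (h : MdctOK Blk mem f) (hb : BuffersOK Blk mem f)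
    (hB : ∀ B, Blk B → Blk' B) : MdctOK Blk' mem f ∧ BuffersOK Blk' mem f :=
  ⟨h.reblk (fun B _ hx => hB B hx), hb.reblk (fun B _ hx => hB B hx)⟩

/-- get_window with `len = previous_length`: the 32-bit doubling compared with `blocksize_1` says `2 len = b1`, and then the
window returned is the allocated block of exactly `len` floats. -/
example (Blk : Block → Prop) (mem : Mem) (f : Nat) (h : MdctOK Blk mem f) (hb : BuffersOK Blk mem f) (hd : HD3 mem f)
    (ht : ((stb_vorbis.previous_length mem f + stb_vorbis.previous_length mem f) % 4294967296).toNat = bsize mem f 1) :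
    Blk ⟨stb_vorbis.window mem f 1, 4 * (stb_vorbis.previous_length mem f).toNat⟩ := by
  have hb1 := hd.b1.facts
  have h7 := hb.M7
  unfold M7Range at h7
  have e := (get_window_arith h7.1 h7.2 hb1.2.2 hb1.2.2).mp ht
  exact h.window_of_len (by omega) e

/-! ### (e) Establishment -/

/-- SD.10 / SD.11: the two groups assembled from what the pieces of `start_decoder` leave. -/
example (Blk : Block → Prop) (mem : Mem) (f : Nat) (hd : HD3 mem f)
    (hch : ChanUpTo Blk mem f (stb_vorbis.channels mem f).toNat) (hpl : stb_vorbis.previous_length mem f = 0)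
    (h20 : stb_vorbis.blocksize mem f 0 = stb_vorbis.blocksize_0 mem f)
    (h21 : stb_vorbis.blocksize mem f 1 = stb_vorbis.blocksize_1 mem f)
    (t0 : Tables Blk mem f 0 (bsize mem f 0)) (t1 : Tables Blk mem f 1 (bsize mem f 1))
    (r0 : RevOK mem (stb_vorbis.bit_reverse mem f 0) (bsize mem f 0))
    (r1 : RevOK mem (stb_vorbis.bit_reverse mem f 1) (bsize mem f 1)) : BuffersOK Blk mem f ∧ MdctOK Blk mem f :=
  ⟨BuffersOK.of_parts hch (by omega) (M7Range.of_zero hpl), MdctOK.of_parts h20 h21 hd t0 t1 r0 r1⟩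

/-- The channel loop, iteration `i`: the two `setup_malloc` results are blocks of the grown predicate `Blk'`. -/
example (Blk Blk' : Block → Prop) (mem mem' : Mem) (f i : Nat) (h : ChanUpTo Blk mem f i) (hr : ReadsSame mem mem' f)
    (hi : i < 16) (hB : ∀ B, Blk B → Blk' B)
    (hnew : Blk' ⟨stb_vorbis.channel_buffers mem' f i, 4 * bsize mem' f 1⟩ ∧
      Blk' ⟨stb_vorbis.previous_window mem' f i, 2 * bsize mem' f 1⟩) : ChanUpTo Blk' mem' f i ∧ ChanUpTo Blk' mem' f (i + 1) := by
  have hcb : ∀ j, j < i → stb_vorbis.channel_buffers mem' f j = stb_vorbis.channel_buffers mem f j :=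
    fun j hj => hr.channel_buffers j (by omega)
  have hpw : ∀ j, j < i → stb_vorbis.previous_window mem' f j = stb_vorbis.previous_window mem f j :=
    fun j hj => hr.previous_window j (by omega)
  exact ⟨h.congr hcb hpw hr.blocksize_1 hB, h.step hcb hpw hr.blocksize_1 hB hnew⟩

/-- One iteration of compute_bitreverse: `shr eax, cl` with `cl = 35 - ld` (in `22 .. 29`: the hardware's mask of the count is
the identity), `lea ebx, [rax * 4]`, `mov [r15], bx`: the invariant moves from `i` to `i + 1`, whatever `bit_reverse(i)` was. -/
example (mem : Mem) (R n k i x : Nat) (hk : Ld n k) (h : RevUpTo mem R n i) (hx : x < 2 ^ 32) (hR : R + 2 * i + 2 ≤ 2 ^ 64) :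
    (35 - k) % 32 = 35 - k ∧
    RevUpTo (mem.writeLE (addr (R + 2 * i)) 2 ((x >>> ((35 - k) % 32)) <<< 2)) R n (i + 1) := by
  have hs := shift_count_ld hk
  rw [hs.2.2.1]
  exact ⟨rfl, h.step_value hk hx hR⟩

/-- `ld` from the contract of `ilog`: the value `ilog` returns for a block size is `ld + 1`. -/
example (n k : Nat) (hk : Ld n k) : ilogC n - 1 = k := by
  rw [ilogC_ld hk]
  omega

/-- The case split I5 recommends: for one size every quantity of the nest is a numeral. -/
example (n k : Nat) (hk : Ld n k) (h13 : k = 13) : k0 n 5 = 64 ∧ k02 n 5 = 32 ∧ lim 5 = 64 ∧ k1 5 = 256 ∧ rlim n 5 = 4 := by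
  rcases hk.cases with ⟨rfl, rfl⟩ | ⟨rfl, rfl⟩ | ⟨rfl, rfl⟩ | ⟨rfl, rfl⟩ | ⟨rfl, rfl⟩ | ⟨rfl, rfl⟩ | ⟨rfl, rfl⟩ | ⟨rfl, rfl⟩ <;>
    first
    | omega
    | decide

/-! ### No axiom beyond Lean's three -/

#print axioms MdctOK.transfer
#print axioms MdctOK.frame_windows
#print axioms MdctOK.of_parts
#print axioms BuffersOK.transfer
#print axioms BuffersOK.frame_windows
#print axioms ReadsEq.of_objEq
#print axioms RevOK.site_u
#print axioms Call.secondL_call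
#print axioms Call.firstL
#print axioms rev_value
#print axioms RevUpTo.step_value
#print axioms L1.test_addr
#print axioms site_f32_down

end Vorbis.MdctTest
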